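-- pv_equiv track=rewrite | github.com/rashevskii/python_training | binary_search.py | right_boundary
-- ===== SOURCE A (Python) =====
-- def right_boundary(A: list, key: int):
--     left = -1
--     right = len(A)
--     while right - left > 1:
--         middle = (left + right) // 2
--         if A[middle] <= key:
--             left = middle
--         else:
--             right = middle
--     return right
-- ===== SOURCE B (Python) =====
-- def right_boundary(A: list, key: int):
--     def go(left, width):
--         if width <= 1:
--             return left + width
--         half = width // 2
--         if A[left + half] <= key:
--             return go(left + half, width - half)
--         return go(left, half)
--     return go(-1, len(A) + 1)
-- ===== Notes on version B (the rewrite author's own statement) =====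
-- stated objective: alternative
-- what changed: A's while-loop over the mutable pair (left, right) is replaced by a recursion over a different state (left, width) where width = right - left: the base case returns left + width, the midpoint is left + width // 2, and the recursion shrinks the nonnegative width, which also serves as the structural termination measure.
import Mathlib
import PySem

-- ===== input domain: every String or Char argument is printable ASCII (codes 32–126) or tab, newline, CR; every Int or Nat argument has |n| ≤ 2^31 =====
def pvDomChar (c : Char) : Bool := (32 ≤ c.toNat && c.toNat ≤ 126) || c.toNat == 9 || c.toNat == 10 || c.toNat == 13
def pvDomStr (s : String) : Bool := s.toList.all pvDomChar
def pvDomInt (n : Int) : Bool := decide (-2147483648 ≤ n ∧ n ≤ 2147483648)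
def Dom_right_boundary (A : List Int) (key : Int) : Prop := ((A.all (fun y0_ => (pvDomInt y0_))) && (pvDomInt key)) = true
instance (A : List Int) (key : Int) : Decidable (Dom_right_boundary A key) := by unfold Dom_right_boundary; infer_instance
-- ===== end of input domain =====

-- B replaces A's while-loop over the pair (left, right) by a recursion over the state
-- (left, width) with width = right - left; same return value (objective: alternative).

-- ===== PORT A =====
-- A's while-loop: state (left, right), iterate while right - left > 1.
-- The Nat fuel is only a totality guard (the gap right - left starts at len(A)+1 and
-- strictly shrinks each iteration, so fuel len(A)+1 is never exhausted); A[middle] is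
-- always in range on every reachable state, so the .getD 0 default is never used: exact.
def rbLoop (A : List Int) (key : Int) : Nat → Int → Int → Int
  | 0, _left, right => right
  | n + 1, left, right =>
    if right - left > 1 then
      let middle := PySem.Int.floordiv (left + right) 2
      if (PySem.List.pyGet? A middle).getD 0 ≤ key then
        rbLoop A key n middle right
      else
        rbLoop A key n left middle
    else
      right

def right_boundary (A : List Int) (key : Int) : Int :=
  rbLoop A key (A.length + 1) (-1) (A.length : Int)

-- ===== PORT B =====
-- B's helper go(left, width): width is len(A)+1 initially and stays a nonnegative
-- integer throughout (half and width - half for 2 ≤ width), so it is carried as a Nat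
-- and is the structural termination measure; A[left + half] is always in range on every
-- reachable state, so the .getD 0 default is never used: exact.
def rbGo (A : List Int) (key : Int) (left : Int) (width : Nat) : Int :=
  if width ≤ 1 then left + (width : Int)
  else
    let half := width / 2
    if (PySem.List.pyGet? A (left + (half : Int))).getD 0 ≤ key then
      rbGo A key (left + (half : Int)) (width - half)
    else
      rbGo A key left half
termination_by width
decreasing_by
  · omega
  · omega

def right_boundary_alt (A : List Int) (key : Int) : Int :=
  rbGo A key (-1) (A.length + 1)

-- ===== PRECONDITION & SPEC =====
def Spec_right_boundary (A : List Int) (key : Int) (out : Int) : Prop := out = right_boundary_alt A key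
instance (A : List Int) (key : Int) (out : Int) : Decidable (Spec_right_boundary A key out) := by unfold Spec_right_boundary; infer_instance

-- ===== CLAIM =====
def Claim_equal_right_boundary : Prop := ∀ (A : List Int) (key : Int), Dom_right_boundary A key → Spec_right_boundary A key (right_boundary A key)

-- ===== LEMMAS AND PROOFS =====

-- Python's floor midpoint of (left, left + width) is left + width / 2 (Nat division).
theorem mid_eq (left : Int) (w : Nat) :
    PySem.Int.floordiv (left + (left + (w : Int))) 2 = left + ((w / 2 : Nat) : Int) := by
  rw [PySem.Int.floordiv_eq_ediv_of_pos (by omega)]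
  omega

-- With enough fuel, A's loop from (left, left + w) equals B's recursion on (left, w).
theorem rbLoop_eq_rbGo (A : List Int) (key : Int) :
    ∀ (n : Nat) (w : Nat) (left : Int), w ≤ n → rbLoop A key n left (left + (w : Int)) = rbGo A key left w := by
  intro n
  induction n with
  | zero =>
      intro w left hw
      interval_cases w
      rw [rbLoop, rbGo]
      simp
  | succ n ih =>
      intro w left hw
      rw [rbLoop, rbGo]
      by_cases h1 : w ≤ 1
      · rw [if_neg (by omega : ¬ left + (w : Int) - left > 1), if_pos h1]
      · rw [if_pos (by omega : left + (w : Int) - left > 1), if_neg h1]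
        simp only [mid_eq]
        split_ifs with hc
        · have : left + (w : Int) = (left + ((w / 2 : Nat) : Int)) + ((w - w / 2 : Nat) : Int) := by
            omega
          rw [this, ih (w - w / 2) _ (by omega)]
        · have : left + ((w / 2 : Nat) : Int) = left + ((w / 2 : Nat) : Int) := rfl
          exact ih (w / 2) left (by omega)

-- ===== VERDICT =====
theorem right_boundary_spec : Claim_equal_right_boundary := by
  intro A key _
  unfold Spec_right_boundary right_boundary right_boundary_alt
  have h : (A.length : Int) = (-1) + ((A.length + 1 : Nat) : Int) := by omega
  rw [h]
  exact rbLoop_eq_rbGo A key (A.length + 1) (A.length + 1) (-1) le_rfl
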